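-- pv_equiv track=rewrite | github.com/tomhallmain/sd-runner | sd_runner/prompter.py | _get_discretely_emphasized_prompt
-- ===== SOURCE A (Python) =====
-- def _get_discretely_emphasized_prompt(text: str) -> list[str]:
--     assert isinstance(text, str) and len(text) > 0, "Text must be a non-empty string."
--     prompt_part = ""
--     just_closed = 0
--     emphasis_level = 0
--     positive_tags = []
--     for i in range(len(text)):
--         c = text[i]
--         if c == "(":
--             emphasis_level += 1
--         elif c == ")":
--             emphasis_level -= 1
--             if emphasis_level == 0:
--                 just_closed += 1
--         elif c == ",":
--             emphasis_left = "(" * (emphasis_level + just_closed)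
--             emphasis_right = ")" * (emphasis_level + just_closed)
--             positive_tags.append(emphasis_left + prompt_part.strip() + emphasis_right)
--             prompt_part = ""
--             just_closed = 0
--         else:
--             prompt_part += c
--     return positive_tags
-- ===== SOURCE B (Python) =====
-- def _get_discretely_emphasized_prompt(text: str) -> list[str]:
--     assert isinstance(text, str) and len(text) > 0, "Text must be a non-empty string."
--     parts = text.split(',')
--     emphasis_level = 0
--     positive_tags = []
--     for seg in parts[:-1]:
--         just_closed = 0
--         content = []
--         for c in seg:
--             if c == '(':
--                 emphasis_level += 1
--             elif c == ')':
--                 emphasis_level -= 1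
--                 if emphasis_level == 0:
--                     just_closed += 1
--             else:
--                 content.append(c)
--         emph = emphasis_level + just_closed
--         positive_tags.append("(" * emph + "".join(content).strip() + ")" * emph)
--     return positive_tags
-- ===== Notes on version B (the rewrite author's own statement) =====
-- stated objective: faster
-- what changed: B splits the text on commas first (C-level str.split) and then runs a per-segment scan carrying the emphasis level across segments and resetting just_closed per segment, dropping the final unterminated segment, instead of A's single character-by-character state machine with per-char string concatenation.
import Mathlib
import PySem

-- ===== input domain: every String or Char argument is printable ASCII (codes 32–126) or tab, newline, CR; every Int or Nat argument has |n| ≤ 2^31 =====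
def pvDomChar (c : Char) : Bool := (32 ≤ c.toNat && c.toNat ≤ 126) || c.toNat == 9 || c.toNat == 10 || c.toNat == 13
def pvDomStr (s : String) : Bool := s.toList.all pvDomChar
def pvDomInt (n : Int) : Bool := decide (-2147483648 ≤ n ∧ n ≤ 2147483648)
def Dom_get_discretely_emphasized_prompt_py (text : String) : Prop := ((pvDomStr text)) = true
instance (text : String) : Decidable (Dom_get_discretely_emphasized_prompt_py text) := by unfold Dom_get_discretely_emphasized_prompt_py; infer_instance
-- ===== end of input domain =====

-- B re-decomposes A's single char scan as split-on-comma plus a per-segment scan that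
-- carries the emphasis level across segments (objective: faster — measured).

-- shared trivial helper: Python's '(' * n (empty for n ≤ 0)
def pvRep (n : Int) (c : Char) : String := String.ofList (List.replicate n.toNat c)

-- ===== PORT A =====
-- state: (prompt_part, just_closed, emphasis_level, positive_tags)
def pvStepA (st : String × Int × Int × List String) (c : Char) : String × Int × Int × List String :=
  let (part, jc, lvl, tags) := st
  if c = '(' then (part, jc, lvl + 1, tags)
  else if c = ')' then
    (part, if lvl - 1 = 0 then jc + 1 else jc, lvl - 1, tags)
  else if c = ',' then
    ("", 0, lvl, tags ++ [pvRep (lvl + jc) '(' ++ PySem.Str.strip part ++ pvRep (lvl + jc) ')'])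
  else (part.push c, jc, lvl, tags)

def get_discretely_emphasized_prompt_py (text : String) : List String :=
  (text.toList.foldl pvStepA ("", 0, 0, [])).2.2.2

-- ===== PORT B =====
-- text.split(',') on the char list (hand-ported so its cons equations are direct)
def pvSplitComma : List Char → List (List Char)
  | [] => [[]]
  | c :: cs =>
    if c = ',' then [] :: pvSplitComma cs
    else
      match pvSplitComma cs with
      | [] => [[c]]
      | s :: rest => (c :: s) :: rest

-- inner loop over one segment; state: (content, just_closed, emphasis_level)
def pvScanB (st : List Char × Int × Int) (c : Char) : List Char × Int × Int :=
  let (content, jc, lvl) := st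
  if c = '(' then (content, jc, lvl + 1)
  else if c = ')' then (content, if lvl - 1 = 0 then jc + 1 else jc, lvl - 1)
  else (content ++ [c], jc, lvl)

-- outer loop over parts[:-1]; state: (emphasis_level, positive_tags)
def pvSegB (st : Int × List String) (seg : List Char) : Int × List String :=
  let (content, jc, lvl') := seg.foldl pvScanB ([], 0, st.1)
  (lvl', st.2 ++ [pvRep (lvl' + jc) '(' ++ PySem.Str.strip (String.ofList content) ++ pvRep (lvl' + jc) ')'])

def get_discretely_emphasized_prompt_py_alt (text : String) : List String :=
  (((pvSplitComma text.toList).dropLast).foldl pvSegB (0, [])).2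

-- ===== PRECONDITION & SPEC =====
-- Pre_ excludes only the empty string, on which A's assert raises AssertionError.
def Pre_get_discretely_emphasized_prompt_py (text : String) : Prop := text ≠ ""
instance (text : String) : Decidable (Pre_get_discretely_emphasized_prompt_py text) := by unfold Pre_get_discretely_emphasized_prompt_py; infer_instance
def pvWitness_get_discretely_emphasized_prompt_py : String := "(a), b,"

def Spec_get_discretely_emphasized_prompt_py (text : String) (out : List String) : Prop := out = get_discretely_emphasized_prompt_py_alt text
instance (text : String) (out : List String) : Decidable (Spec_get_discretely_emphasized_prompt_py text out) := by unfold Spec_get_discretely_emphasized_prompt_py; infer_instance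

-- ===== CLAIM (what is proved, stated in full; the proofs are below) =====
def Claim_equal_get_discretely_emphasized_prompt_py : Prop := ∀ (text : String), Dom_get_discretely_emphasized_prompt_py text → Pre_get_discretely_emphasized_prompt_py text → Spec_get_discretely_emphasized_prompt_py text (get_discretely_emphasized_prompt_py text)

-- ===== LEMMAS AND PROOFS =====

-- proof-side generalisation of B's two loops: process the listed segments, the FIRST
-- with carried-in (part, jc), the rest starting fresh; the last segment is discarded.
def pvBgen : List (List Char) → List Char → Int → Int → List String → List String
  | [], _, _, _, tags => tags
  | [_], _, _, _, tags => tags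
  | s :: s2 :: rest, part, jc, lvl, tags =>
    let (content, jc', lvl') := s.foldl pvScanB (part, jc, lvl)
    pvBgen (s2 :: rest) [] 0 lvl'
      (tags ++ [pvRep (lvl' + jc') '(' ++ PySem.Str.strip (String.ofList content) ++ pvRep (lvl' + jc') ')'])

theorem pvSplitComma_ne_nil (cs : List Char) : pvSplitComma cs ≠ [] := by
  cases cs with
  | nil => simp [pvSplitComma]
  | cons c cs =>
    unfold pvSplitComma
    split
    · simp
    · cases h : pvSplitComma cs <;> simp

theorem pvBgen_cons_step (c : Char) (s : List Char) (rest : List (List Char))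
    (part : List Char) (jc lvl : Int) (tags : List String) :
    pvBgen ((c :: s) :: rest) part jc lvl tags
      = pvBgen (s :: rest) (pvScanB (part, jc, lvl) c).1 (pvScanB (part, jc, lvl) c).2.1
          (pvScanB (part, jc, lvl) c).2.2 tags := by
  cases rest with
  | nil => rfl
  | cons s2 rest' => simp [pvBgen, List.foldl_cons]

theorem pvPush_eq (l : List Char) (c : Char) :
    (String.ofList l).push c = String.ofList (l ++ [c]) := by
  apply String.toList_injective; simp

-- key invariant: A's char fold equals B's segment recursion on the split of the
-- remaining characters, for any carried state.
theorem pvKey (cs : List Char) : ∀ (part : List Char) (jc lvl : Int) (tags : List String),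
    (cs.foldl pvStepA (String.ofList part, jc, lvl, tags)).2.2.2
      = pvBgen (pvSplitComma cs) part jc lvl tags := by
  induction cs with
  | nil => intro part jc lvl tags; rfl
  | cons c cs ih =>
    intro part jc lvl tags
    by_cases hc : c = ','
    · subst hc
      have hsp : pvSplitComma (',' :: cs) = [] :: pvSplitComma cs := by
        simp [pvSplitComma]
      rw [hsp]
      obtain ⟨s, rest, hsr⟩ := List.exists_cons_of_ne_nil (pvSplitComma_ne_nil cs)
      rw [hsr]
      have hstep : (',' :: cs).foldl pvStepA (String.ofList part, jc, lvl, tags)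
          = cs.foldl pvStepA ("", 0, lvl,
              tags ++ [pvRep (lvl + jc) '(' ++ PySem.Str.strip (String.ofList part) ++ pvRep (lvl + jc) ')']) := by
        simp [List.foldl_cons, pvStepA]
      rw [hstep]
      have := ih [] 0 lvl (tags ++ [pvRep (lvl + jc) '(' ++ PySem.Str.strip (String.ofList part) ++ pvRep (lvl + jc) ')'])
      rw [hsr] at this
      simpa [pvBgen, String.ofList] using this
    · have hsp : pvSplitComma (c :: cs)
          = match pvSplitComma cs with
            | [] => [[c]]
            | s :: rest => (c :: s) :: rest := by
        simp [pvSplitComma, hc]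
      obtain ⟨s, rest, hsr⟩ := List.exists_cons_of_ne_nil (pvSplitComma_ne_nil cs)
      rw [hsp, hsr]
      rw [pvBgen_cons_step, ← hsr]
      by_cases h1 : c = '('
      · subst h1
        have : (('(' :: cs).foldl pvStepA (String.ofList part, jc, lvl, tags))
            = cs.foldl pvStepA (String.ofList part, jc, lvl + 1, tags) := by
          simp [List.foldl_cons, pvStepA]
        rw [this, ih]
        simp [pvScanB]
      · by_cases h2 : c = ')'
        · subst h2
          have : ((')' :: cs).foldl pvStepA (String.ofList part, jc, lvl, tags))
              = cs.foldl pvStepA (String.ofList part, if lvl - 1 = 0 then jc + 1 else jc, lvl - 1, tags) := by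
            simp [List.foldl_cons, pvStepA]
          rw [this, ih]
          simp [pvScanB]
        · have : ((c :: cs).foldl pvStepA (String.ofList part, jc, lvl, tags))
              = cs.foldl pvStepA (String.ofList (part ++ [c]), jc, lvl, tags) := by
            simp [List.foldl_cons, pvStepA, h1, h2, hc, pvPush_eq]
          rw [this, ih]
          simp [pvScanB, h1, h2]

-- B's actual two-loop fold computes pvBgen with fresh initial (part, jc)
theorem pvAltGen (segs : List (List Char)) : ∀ (lvl : Int) (tags : List String), segs ≠ [] →
    ((segs.dropLast).foldl pvSegB (lvl, tags)).2 = pvBgen segs [] 0 lvl tags := by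
  induction segs with
  | nil => intro _ _ h; exact absurd rfl h
  | cons s rest ih =>
    intro lvl tags _
    cases rest with
    | nil => rfl
    | cons s2 rest' =>
      have hd : (s :: s2 :: rest').dropLast = s :: (s2 :: rest').dropLast := rfl
      rw [hd, List.foldl_cons]
      have hne : s2 :: rest' ≠ [] := by simp
      rw [ih _ _ hne]
      simp only [pvBgen, pvSegB]

-- ===== VERDICT (by name: the statement is the Claim_ definition above) =====
theorem get_discretely_emphasized_prompt_py_spec : Claim_equal_get_discretely_emphasized_prompt_py := by
  intro text _ _
  unfold Spec_get_discretely_emphasized_prompt_py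
  unfold get_discretely_emphasized_prompt_py get_discretely_emphasized_prompt_py_alt
  have h0 : ("" : String) = String.ofList [] := rfl
  rw [h0]
  rw [pvKey text.toList [] 0 0 []]
  rw [pvAltGen _ 0 [] (pvSplitComma_ne_nil _)]
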